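-- pv_equiv track=rewrite | github.com/hye0e/Algorithm | Implementation/problem1.py | solution
-- ===== SOURCE A (Python) =====
-- from typing import List
--
-- def make(num):
--     size = 0
--     n = 0
--     while num > size:
--         size = 2 ** n
--         n += 1
--
--     return size
--
-- def solution(queries: List[List[int]]) -> int:
--     answer = 0
--     copy = 0
--     # 배열 번호와 남은 크기
--     dict = {}
--     for query in queries:
--         if query[0] not in dict:
--             size = make(query[1])
--             rest_size = size - query[1]
--             dict[query[0]] = [rest_size, [query[1]]]
--         else:
--             # 추가를 하지 않아도 될 경우
--             if dict[query[0]][0] >= query[1]: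
--                 dict[query[0]][0] = dict[query[0]][0] - query[1]
--                 dict[query[0]][1].append(query[1])
--             # 추가를 해줘야할 경우 1. 추가 2. 복사
--             else:
--                 size = make(sum(dict[query[0]][1]) + query[1])
--                 copy += sum(dict[query[0]][1])
--
--                 dict[query[0]][0] = size - query[1]
--                 dict[query[0]][1].append(query[1])
--
--     return copy
-- ===== SOURCE B (Python) =====
-- from typing import List
-- from itertools import accumulate
--
--
-- def growth(num):
--     # smallest power of two >= num, in closed form (0 for num <= 0)
--     return 0 if num <= 0 else 1 << (num - 1).bit_length()
--
--
-- def solution(queries: List[List[int]]) -> int: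
--     # Stage 1: group the requested block sizes by array id (insertion order).
--     groups = {}
--     for q in queries:
--         groups.setdefault(q[0], []).append(q[1])
--     # Stage 2: arrays are independent, so handle each id's whole request
--     # sequence at once.  Over its prefix sums, keep only `limit`: the highest
--     # absolute position the current allocation reaches (the capacity obtained
--     # at the last reallocation, offset by the elements already written then).
--     copied = 0
--     for needs in groups.values():
--         sums = list(accumulate(needs))
--         limit = growth(sums[0])
--         for prev, cur in zip(sums, sums[1:]):
--             if cur > limit:
--                 copied += prev
--                 limit = growth(cur) + prev
--     return copied
-- ===== Notes on version B (the rewrite author's own statement) =====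
-- stated objective: alternative
-- what changed: B first groups the requests by array id and then handles each id's whole sequence in one prefix-sum scan that keeps a single reach limit, instead of A's interleaved single pass that stores every insertion in a per-id list and re-sums it on each reallocation; the power-of-two capacity is a closed-form bit_length instead of A's doubling loop.
import Mathlib
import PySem

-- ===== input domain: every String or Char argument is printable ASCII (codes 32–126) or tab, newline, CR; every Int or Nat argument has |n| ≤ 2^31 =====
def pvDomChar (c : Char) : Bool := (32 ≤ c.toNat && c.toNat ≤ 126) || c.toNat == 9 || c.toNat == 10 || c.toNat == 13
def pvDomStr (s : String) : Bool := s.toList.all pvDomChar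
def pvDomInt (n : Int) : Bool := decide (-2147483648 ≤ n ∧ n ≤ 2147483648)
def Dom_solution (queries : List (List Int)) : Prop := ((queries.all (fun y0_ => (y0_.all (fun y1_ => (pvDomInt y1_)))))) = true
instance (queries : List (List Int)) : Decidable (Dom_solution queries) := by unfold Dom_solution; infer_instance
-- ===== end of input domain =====

-- B groups the requests by array id first and then handles each id's whole sequence in one
-- prefix-sum scan (with a closed-form power-of-two), instead of A's interleaved pass that
-- keeps every insertion in a per-id list and re-sums it on each reallocation (alternative).

-- ===== PORT A =====
-- A's `make`: while num > size: size = 2**n; n += 1.  Fuel only makes the loop total.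
def pyMakeAux (fuel : Nat) (num size : Int) (n : Nat) : Int :=
  match fuel with
  | 0 => size
  | fuel + 1 => if num > size then pyMakeAux fuel num ((2 : Int) ^ n) (n + 1) else size

def make (num : Int) : Int := pyMakeAux (num.toNat + 1) num 0 0

-- Python's sum over a list
def sumInt (l : List Int) : Int := l.foldl (· + ·) 0

def solutionStep (st : Int × PySem.Dict Int (Int × List Int)) (query : List Int) :
    Int × PySem.Dict Int (Int × List Int) :=
  let copy := st.1
  let d := st.2
  let q0 := (PySem.List.pyGet? query 0).getD 0
  let q1 := (PySem.List.pyGet? query 1).getD 0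
  if ¬ d.contains q0 then
    let size := make q1
    let rest_size := size - q1
    (copy, d.insert q0 (rest_size, [q1]))
  else
    let e := d.getD q0 (0, [])
    if e.1 ≥ q1 then
      (copy, d.insert q0 (e.1 - q1, e.2 ++ [q1]))
    else
      let size := make (sumInt e.2 + q1)
      (copy + sumInt e.2, d.insert q0 (size - q1, e.2 ++ [q1]))

def solution (queries : List (List Int)) : Int :=
  (queries.foldl solutionStep (0, PySem.Dict.empty)).1

-- ===== PORT B =====
-- Source B's growth: 0 if num <= 0 else 1 << (num - 1).bit_length()
def growth (num : Int) : Int :=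
  if num ≤ 0 then 0 else (1 : Int) <<< PySem.Int.bitLength (num - 1)

-- itertools.accumulate(needs), with the running total made explicit (starts at 0)
def accum (t : Int) : List Int → List Int
  | [] => []
  | n :: ns => (t + n) :: accum (t + n) ns

-- the body of Source B's inner loop over zip(sums, sums[1:]); state = (copied, limit)
def scanStep (st : Int × Int) (pc : Int × Int) : Int × Int :=
  if pc.2 > st.2 then (st.1 + pc.1, growth pc.2 + pc.1) else st

-- one iteration of Source B's outer loop: scan one id's needs, continuing the copied total.
-- groups' values are never empty, so the [] branch is unreachable (Python raises on sums[0]).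
def perKeyFrom (copied : Int) (needs : List Int) : Int :=
  match accum 0 needs with
  | [] => copied
  | s0 :: rest => (((s0 :: rest).zip rest).foldl scanStep (copied, growth s0)).1

-- Source B's stage 1: groups.setdefault(q[0], []).append(q[1])
def groupStep (d : PySem.Dict Int (List Int)) (q : List Int) : PySem.Dict Int (List Int) :=
  d.modify ((PySem.List.pyGet? q 0).getD 0) [] (· ++ [(PySem.List.pyGet? q 1).getD 0])

def groupsOf (queries : List (List Int)) : PySem.Dict Int (List Int) :=
  queries.foldl groupStep PySem.Dict.empty

def solution_alt (queries : List (List Int)) : Int :=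
  ((groupsOf queries).values).foldl perKeyFrom 0

-- ===== PRECONDITION & SPEC =====
-- Pre_ excludes exactly the inputs on which Python A raises IndexError: a query list
-- with fewer than two elements.
def Pre_solution (queries : List (List Int)) : Prop := ∀ q ∈ queries, 2 ≤ q.length
instance (queries : List (List Int)) : Decidable (Pre_solution queries) := by
  unfold Pre_solution; infer_instance

def pvWitness_solution : List (List Int) := [[1, 1], [1, 2], [1, 3], [2, 5], [1, 10]]

def Spec_solution (queries : List (List Int)) (out : Int) : Prop := out = solution_alt queries
instance (queries : List (List Int)) (out : Int) : Decidable (Spec_solution queries out) := by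
  unfold Spec_solution; infer_instance

-- ===== CLAIM (what is proved, stated in full; the proofs are below) =====
def Claim_equal_solution : Prop := ∀ (queries : List (List Int)), Dom_solution queries →
  Pre_solution queries → Spec_solution queries (solution queries)

-- ===== LEMMAS AND PROOFS =====

-- make's loop computes the closed form 2 ^ size
theorem pyMakeAux_loop (fuel : Nat) : ∀ (n m : Nat), n ≤ m.size → m < 2 ^ (n + fuel) →
    pyMakeAux fuel ((m : Int) + 1) ((2 : Int) ^ n) (n + 1) = (2 : Int) ^ m.size := by
  induction fuel with
  | zero =>
    intro n m hn hm
    have : m.size ≤ n := Nat.size_le.mpr (by simpa using hm)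
    simp [pyMakeAux, Nat.le_antisymm this hn]
  | succ fuel ih =>
    intro n m hn hm
    by_cases h : (2 : Int) ^ n ≤ (m : Int)
    · have h2 : (2 : Nat) ^ n ≤ m := by exact_mod_cast h
      have hlt : n < m.size := by
        by_contra hc
        exact absurd (Nat.size_le.mp (Nat.le_of_not_lt hc)) (Nat.not_lt.mpr h2)
      have : pyMakeAux (fuel + 1) ((m : Int) + 1) ((2 : Int) ^ n) (n + 1)
          = pyMakeAux fuel ((m : Int) + 1) ((2 : Int) ^ (n + 1)) (n + 1 + 1) := by
        simp only [pyMakeAux, if_pos (by linarith : (m : Int) + 1 > (2 : Int) ^ n)]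
      rw [this]
      refine ih (n + 1) m hlt ?_
      have he : n + 1 + fuel = n + (fuel + 1) := by omega
      rw [he]; exact hm
    · have h2 : m < 2 ^ n := by
        have : (m : Int) < (2 : Int) ^ n := lt_of_not_ge h
        exact_mod_cast this
      have hsz : m.size ≤ n := Nat.size_le.mpr h2
      have hstop : ¬ ((m : Int) + 1 > (2 : Int) ^ n) := by
        have : (m : Int) < (2 : Int) ^ n := lt_of_not_ge h
        omega
      rw [show pyMakeAux (fuel + 1) ((m : Int) + 1) ((2 : Int) ^ n) (n + 1) = (2 : Int) ^ n from by
        simp [pyMakeAux, hstop]]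
      rw [Nat.le_antisymm hsz hn]

-- Python's bit_length of a nonnegative int is Nat.size
theorem bitLength_eq_size (m : Nat) : PySem.Int.bitLength (m : Int) = m.size := by
  by_cases h0 : m = 0
  · subst h0; simp [PySem.Int.bitLength_zero]
  · have hlt : m < 2 ^ PySem.Int.bitLength (m : Int) := by
      have := PySem.Int.lt_two_pow_bitLength (m : Int)
      simpa using this
    have hs : m.size ≤ PySem.Int.bitLength (m : Int) := Nat.size_le.mpr hlt
    have hle : 2 ^ (PySem.Int.bitLength (m : Int) - 1) ≤ m := by
      have := PySem.Int.two_pow_bitLength_le (m : Int) (by exact_mod_cast h0)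
      simpa using this
    have hm2 : m < 2 ^ m.size := Nat.lt_size_self m
    have : 2 ^ (PySem.Int.bitLength (m : Int) - 1) < 2 ^ m.size := lt_of_le_of_lt hle hm2
    have hlt2 : PySem.Int.bitLength (m : Int) - 1 < m.size :=
      (Nat.pow_lt_pow_iff_right (by omega)).mp this
    have hbl0 : PySem.Int.bitLength (m : Int) ≠ 0 := by
      intro h
      rw [h] at hlt
      omega
    omega

theorem make_eq_growth (num : Int) : make num = growth num := by
  by_cases h : num ≤ 0
  · have h0 : ¬ (num > 0) := by omega
    unfold make growth pyMakeAux
    simp [h, h0]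
  · have h1 : (1 : Int) ≤ num := by omega
    set m : Nat := (num - 1).toNat with hm
    have hnum : (m : Int) + 1 = num := by omega
    have hfuel : num.toNat + 1 = (m + 1) + 1 := by omega
    have step1 : make num = pyMakeAux (m + 1) num ((2 : Int) ^ (0 : Nat)) 1 := by
      unfold make
      rw [hfuel]
      simp only [pyMakeAux, if_pos (by omega : num > (0 : Int))]
    have hA : make num = (2 : Int) ^ m.size := by
      rw [step1, ← hnum]
      exact pyMakeAux_loop (m + 1) 0 m (Nat.zero_le _)
        (lt_of_lt_of_le (Nat.lt_two_pow_self) (Nat.pow_le_pow_right (by omega) (by omega)))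
    have hcast : num - 1 = (m : Int) := by omega
    rw [hA]
    unfold growth
    rw [if_neg (by omega), hcast, bitLength_eq_size, Int.shiftLeft_eq, one_mul]

-- sum bridge
theorem sumInt_eq_sum (l : List Int) : sumInt l = l.sum := by
  rw [sumInt, ← List.sum_eq_foldl]

-- the per-key simulation A performs for one array id; state = (copy, rest, total)
def stepSim (st : Int × Int × Int) (n : Int) : Int × Int × Int :=
  if st.2.1 ≥ n then (st.1, st.2.1 - n, st.2.2 + n)
  else (st.1 + st.2.2, growth (st.2.2 + n) - n, st.2.2 + n)

def simOf (ns : List Int) : Int × Int × Int := ns.foldl stepSim (0, 0, 0)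

theorem sim_total (ns : List Int) : ∀ st : Int × Int × Int,
    (ns.foldl stepSim st).2.2 = st.2.2 + ns.sum := by
  induction ns with
  | nil => intro st; simp
  | cons n ns ih =>
    intro st
    simp only [List.foldl_cons, List.sum_cons]
    rw [ih]
    unfold stepSim
    split_ifs <;> simp <;> ring

theorem stepSim_init (n : Int) : stepSim (0, 0, 0) n = (0, growth n - n, n) := by
  unfold stepSim
  by_cases h : (0 : Int) ≥ n
  · rw [if_pos h]
    have : growth n = 0 := by unfold growth; rw [if_pos (by omega)]
    simp [this]
  · rw [if_neg h]; simp

theorem sim_copy_shift (ns : List Int) : ∀ c r t : Int,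
    (ns.foldl stepSim (c, r, t)).1 = c + (ns.foldl stepSim (0, r, t)).1 := by
  induction ns with
  | nil => intro c r t; simp
  | cons n ns ih =>
    intro c r t
    simp only [List.foldl_cons]
    by_cases h : r ≥ n
    · rw [show stepSim (c, r, t) n = (c, r - n, t + n) from by unfold stepSim; rw [if_pos h],
        show stepSim (0, r, t) n = (0, r - n, t + n) from by unfold stepSim; rw [if_pos h]]
      rw [ih c, ih 0]
    · rw [show stepSim (c, r, t) n = (c + t, growth (t + n) - n, t + n) from by
          unfold stepSim; rw [if_neg h],
        show stepSim (0, r, t) n = (0 + t, growth (t + n) - n, t + n) from by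
          unfold stepSim; rw [if_neg h]]
      rw [ih (c + t), ih (0 + t)]
      simp only [zero_add]
      ring

-- Source B's prefix-sum scan computes the per-key simulation (limit = rest + total)
theorem scan_eq (ns : List Int) : ∀ t c r : Int,
    ((t :: accum t ns).zip (accum t ns)).foldl scanStep (c, r + t) =
      ((ns.foldl stepSim (c, r, t)).1,
       (ns.foldl stepSim (c, r, t)).2.1 + (ns.foldl stepSim (c, r, t)).2.2) := by
  induction ns with
  | nil => intro t c r; simp [accum]
  | cons n ns ih =>
    intro t c r
    simp only [accum, List.zip_cons_cons, List.foldl_cons]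
    by_cases h : r ≥ n
    · rw [show scanStep (c, r + t) (t, t + n) = (c, r + t) from by
          unfold scanStep; rw [if_neg (by omega : ¬ (t + n > r + t))],
        show stepSim (c, r, t) n = (c, r - n, t + n) from by unfold stepSim; rw [if_pos h]]
      have hrt : r + t = (r - n) + (t + n) := by ring
      rw [hrt, ih (t + n) c (r - n)]
    · rw [show scanStep (c, r + t) (t, t + n) = (c + t, growth (t + n) + t) from by
          unfold scanStep; rw [if_pos (by omega : t + n > r + t)],
        show stepSim (c, r, t) n = (c + t, growth (t + n) - n, t + n) from by
          unfold stepSim; rw [if_neg h]]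
      have hgt : growth (t + n) + t = (growth (t + n) - n) + (t + n) := by ring
      rw [hgt, ih (t + n) (c + t) (growth (t + n) - n)]

theorem perKeyFrom_eq (c : Int) (ns : List Int) : perKeyFrom c ns = c + (simOf ns).1 := by
  cases ns with
  | nil => simp [perKeyFrom, accum, simOf]
  | cons n ns =>
    have hacc : accum 0 (n :: ns) = n :: accum n ns := by simp [accum]
    have hinit : (c, growth n) = (c, (growth n - n) + n) := by rw [sub_add_cancel]
    unfold perKeyFrom
    rw [hacc]
    simp only
    rw [hinit, scan_eq ns n c (growth n - n)]
    simp only [simOf, List.foldl_cons, stepSim_init]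
    exact sim_copy_shift ns c (growth n - n) n

-- sum over a nodup key list when one key's value changes
theorem sum_map_update {α : Type} (l : List α) (k0 : α) (F F' : α → Int)
    (hl : l.Nodup) (hk : k0 ∈ l) (h : ∀ x ∈ l, x ≠ k0 → F' x = F x) :
    (l.map F').sum = (l.map F).sum + (F' k0 - F k0) := by
  induction l with
  | nil => cases hk
  | cons a l ih =>
    rcases List.nodup_cons.mp hl with ⟨ha, hl'⟩
    rcases List.mem_cons.mp hk with rfl | hk'
    · have : l.map F' = l.map F := by
        apply List.map_congr_left
        intro x hx
        exact h x (List.mem_cons_of_mem _ hx) (fun he => ha (he ▸ hx))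
      simp [this]; ring
    · have haF : F' a = F a := h a List.mem_cons_self (fun he => ha (he ▸ hk'))
      have := ih hl' hk' (fun x hx hne => h x (List.mem_cons_of_mem _ hx) hne)
      simp [haF, this]; ring

-- with nodup keys, values are the keys' lookups
theorem values_eq_keys_map_getD (d : PySem.Dict Int (List Int)) (h : d.keys.Nodup) :
    d.values = d.keys.map (fun k => d.getD k []) := by
  have h1 : d.values = d.items.map (fun p => p.2) := rfl
  have h2 : d.keys.map (fun k => d.getD k []) = d.items.map (fun p => d.getD p.1 []) := by
    simp only [PySem.Dict.keys, List.map_map]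
    rfl
  rw [h1, h2]
  apply List.map_congr_left
  intro p hp
  exact (PySem.Dict.getD_of_mem_items d (by simpa using hp) h []).symm

-- the copy accumulated by A equals the per-key simulation copies summed over the grouped dict
theorem main_inv (qs : List (List Int)) :
    ∀ (stA : Int × PySem.Dict Int (Int × List Int)) (g : PySem.Dict Int (List Int)),
    g.keys.Nodup →
    (∀ k, stA.2.contains k = g.contains k) →
    (∀ k, stA.2.getD k (0, []) = ((simOf (g.getD k [])).2.1, g.getD k [])) →
    stA.1 = (g.keys.map (fun k => (simOf (g.getD k [])).1)).sum →
    (qs.foldl solutionStep stA).1 =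
      ((qs.foldl groupStep g).keys.map
        (fun k => (simOf ((qs.foldl groupStep g).getD k [])).1)).sum := by
  induction qs with
  | nil =>
    intro stA g _ _ _ hcopy
    simpa using hcopy
  | cons q qs ih =>
    intro stA g hnd hcont hget hcopy
    simp only [List.foldl_cons]
    set k0 : Int := (PySem.List.pyGet? q 0).getD 0 with hk0
    set n : Int := (PySem.List.pyGet? q 1).getD 0 with hn
    set ns0 : List Int := g.getD k0 [] with hns0
    have hg' : ∀ k, (groupStep g q).getD k [] = if k = k0 then ns0 ++ [n] else g.getD k [] := by
      intro k
      simp only [groupStep, ← hk0, ← hn]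
      rw [hns0]
      exact PySem.Dict.getD_modify g k0 k [] (· ++ [n])
    have hgc : ∀ k, (groupStep g q).contains k = (k == k0 || g.contains k) := by
      intro k
      simp only [groupStep, ← hk0, ← hn]
      exact PySem.Dict.contains_modify g k0 k [] (· ++ [n])
    have hg'k0 : (groupStep g q).getD k0 [] = ns0 ++ [n] := by rw [hg' k0]; simp
    have hg'ne : ∀ k, k ≠ k0 → (groupStep g q).getD k [] = g.getD k [] :=
      fun k hk => by rw [hg' k]; exact if_neg hk
    by_cases hc : stA.2.contains k0
    · -- key already present: A's else branch
      have hgck0 : g.contains k0 = true := (hcont k0) ▸ hc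
      have hk0mem : k0 ∈ g.keys := (PySem.Dict.contains_iff_mem_keys g k0).mp hgck0
      have hkeys' : (groupStep g q).keys = g.keys := by
        simp only [groupStep, ← hk0, ← hn]
        rw [PySem.Dict.keys_modify, PySem.Dict.keys_insert_of_contains _ _ hgck0]
      have he : stA.2.getD k0 (0, []) = ((simOf ns0).2.1, ns0) := hget k0
      have hsimapp : simOf (ns0 ++ [n]) = stepSim (simOf ns0) n := by
        simp [simOf, List.foldl_append]
      have htot : (simOf ns0).2.2 = ns0.sum := by
        simpa using sim_total ns0 (0, 0, 0)
      have hstep : solutionStep stA q =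
          if (simOf ns0).2.1 ≥ n then
            (stA.1, stA.2.insert k0 ((simOf ns0).2.1 - n, ns0 ++ [n]))
          else
            (stA.1 + sumInt ns0,
             stA.2.insert k0 (make (sumInt ns0 + n) - n, ns0 ++ [n])) := by
        simp only [solutionStep, ← hk0, ← hn, if_neg (not_not_intro hc), he]
      by_cases hr : (simOf ns0).2.1 ≥ n
      · -- no reallocation needed
        rw [hstep, if_pos hr]
        have hsim' : simOf (ns0 ++ [n])
            = ((simOf ns0).1, (simOf ns0).2.1 - n, (simOf ns0).2.2 + n) := by
          rw [hsimapp]; unfold stepSim; rw [if_pos hr]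
        refine ih _ (groupStep g q) (by rw [hkeys']; exact hnd) ?_ ?_ ?_
        · intro k
          rw [PySem.Dict.contains_insert, hgc k, hcont k]
        · intro k
          by_cases hk : k = k0
          · subst hk
            rw [PySem.Dict.getD_insert_self, hg'k0, hsim']
          · rw [PySem.Dict.getD_insert_of_ne _ _ _ hk, hg'ne k hk, hget k]
        · rw [hkeys', hcopy]
          congr 1
          apply List.map_congr_left
          intro k hk
          by_cases hkk : k = k0
          · subst hkk
            rw [hg'k0, hsim', ← hns0]
          · rw [hg'ne k hkk]
      · -- reallocation: copy grows by the id's current total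
        rw [hstep, if_neg hr]
        have hsim' : simOf (ns0 ++ [n])
            = ((simOf ns0).1 + (simOf ns0).2.2,
               growth ((simOf ns0).2.2 + n) - n, (simOf ns0).2.2 + n) := by
          rw [hsimapp]; unfold stepSim; rw [if_neg hr]
        have hmk : make (sumInt ns0 + n) - n = (simOf (ns0 ++ [n])).2.1 := by
          rw [hsim', make_eq_growth, sumInt_eq_sum, htot]
        refine ih _ (groupStep g q) (by rw [hkeys']; exact hnd) ?_ ?_ ?_
        · intro k
          rw [PySem.Dict.contains_insert, hgc k, hcont k]
        · intro k
          by_cases hk : k = k0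
          · subst hk
            rw [PySem.Dict.getD_insert_self, hg'k0, hmk]
          · rw [PySem.Dict.getD_insert_of_ne _ _ _ hk, hg'ne k hk, hget k]
        · rw [hkeys']
          rw [sum_map_update g.keys k0
            (fun k => (simOf (g.getD k [])).1)
            (fun k => (simOf ((groupStep g q).getD k [])).1) hnd hk0mem
            (fun x _ hne => by simp only; rw [hg'ne x hne])]
          simp only
          rw [hg'k0, hsim', ← hns0, hcopy, sumInt_eq_sum, htot]
          simp only
          ring
    · -- new key: A's first branch
      have hgck0 : g.contains k0 = false := by
        rw [← hcont k0]
        exact Bool.eq_false_iff.mpr hc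
      have hk0notmem : k0 ∉ g.keys := by
        intro hmem
        rw [(PySem.Dict.contains_iff_mem_keys g k0).mpr hmem] at hgck0
        cases hgck0
      have hns0nil : ns0 = [] := by
        rw [hns0]
        exact PySem.Dict.getD_of_not_contains g [] hgck0
      have hkeys' : (groupStep g q).keys = g.keys ++ [k0] := by
        simp only [groupStep, ← hk0, ← hn]
        rw [PySem.Dict.keys_modify, PySem.Dict.keys_insert_of_not_contains _ _ hgck0]
      have hstep : solutionStep stA q = (stA.1, stA.2.insert k0 (make n - n, [n])) := by
        simp only [solutionStep, ← hk0, ← hn, if_pos hc]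
      have hsimn : simOf [n] = (0, growth n - n, n) := by
        simp [simOf, stepSim_init]
      rw [hstep]
      refine ih _ (groupStep g q) ?_ ?_ ?_ ?_
      · rw [hkeys']
        simp [List.nodup_append, hnd]
        intro a ha he
        rw [he] at ha
        exact hk0notmem ha
      · intro k
        rw [PySem.Dict.contains_insert, hgc k, hcont k]
      · intro k
        by_cases hk : k = k0
        · subst hk
          rw [PySem.Dict.getD_insert_self, hg'k0, hns0nil]
          simp [hsimn, make_eq_growth]
        · rw [PySem.Dict.getD_insert_of_ne _ _ _ hk, hg'ne k hk, hget k]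
      · rw [hkeys', List.map_append, List.sum_append]
        have h1 : (g.keys.map (fun k => (simOf ((groupStep g q).getD k [])).1)).sum
            = (g.keys.map (fun k => (simOf (g.getD k [])).1)).sum := by
          congr 1
          apply List.map_congr_left
          intro k hk
          rw [hg'ne k (fun he => hk0notmem (by rw [← he]; exact hk))]
        have h2 : (simOf ((groupStep g q).getD k0 [])).1 = 0 := by
          rw [hg'k0, hns0nil]
          simp [hsimn]
        simp only [List.map_cons, List.map_nil, List.sum_cons, List.sum_nil, h2]
        rw [h1, hcopy]
        ring

-- ===== VERDICT (by name: the statement is the Claim_ definition above) =====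
theorem solution_spec : Claim_equal_solution := by
  intro queries _ _
  unfold Spec_solution solution solution_alt groupsOf
  have hmain := main_inv queries (0, PySem.Dict.empty) PySem.Dict.empty
    PySem.Dict.nodup_keys_empty
    (fun k => rfl)
    (fun k => by simp [PySem.Dict.getD_empty, simOf])
    (by simp [PySem.Dict.keys_empty])
  rw [hmain]
  have hndq : (queries.foldl groupStep PySem.Dict.empty).keys.Nodup :=
    PySem.Dict.nodup_keys_foldl_modify_key queries
      (fun q => (PySem.List.pyGet? q 0).getD 0) []
      (fun _ q l => l ++ [(PySem.List.pyGet? q 1).getD 0])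
      PySem.Dict.empty PySem.Dict.nodup_keys_empty
  have hfold : ∀ (vs : List (List Int)) (c : Int),
      vs.foldl perKeyFrom c = c + (vs.map (fun ns => (simOf ns).1)).sum := by
    intro vs c
    have hpk : perKeyFrom = fun c ns => c + (simOf ns).1 :=
      funext fun c => funext fun ns => perKeyFrom_eq c ns
    rw [hpk]
    exact PySem.List.foldl_add vs (fun ns => (simOf ns).1) c
  rw [hfold, values_eq_keys_map_getD _ hndq, List.map_map]
  simp [Function.comp_def]
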